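-- pv_equiv track=rewrite | github.com/Emersont1/dndb-scrapers | weapons.py | damage_type
-- ===== SOURCE A (Python) =====
-- def damage_type(string):
--     qty = 0
--     print
--     for x in string.replace(";", "").split(" "):
--         if x == "":
--             continue
--         if x == "B":
--             qty ^= 1
--             continue
--         elif x == "P":
--             qty ^= 2
--             continue
--         elif x == "S":
--             qty ^= 4
--             continue
--         elif x.lower() in ["and", "&"]:
--             qty ^= 8
--             continue
--         elif x.lower() == "or":
--             continue
--     return qty
-- ===== SOURCE B (Python) =====
-- def damage_type(string):
--     toks = string.replace(";", "").split(" ")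
--     b = toks.count("B")
--     p = toks.count("P")
--     s = toks.count("S")
--     a = sum(1 for t in toks if t.lower() in ("and", "&"))
--     return (b % 2) * 1 + (p % 2) * 2 + (s % 2) * 4 + (a % 2) * 8
-- ===== Notes on version B (the rewrite author's own statement) =====
-- stated objective: alternative
-- what changed: Replaces the sequential bit-toggling XOR loop by counting each relevant token once and combining the four parities arithmetically in one fixed step.
import Mathlib
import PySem

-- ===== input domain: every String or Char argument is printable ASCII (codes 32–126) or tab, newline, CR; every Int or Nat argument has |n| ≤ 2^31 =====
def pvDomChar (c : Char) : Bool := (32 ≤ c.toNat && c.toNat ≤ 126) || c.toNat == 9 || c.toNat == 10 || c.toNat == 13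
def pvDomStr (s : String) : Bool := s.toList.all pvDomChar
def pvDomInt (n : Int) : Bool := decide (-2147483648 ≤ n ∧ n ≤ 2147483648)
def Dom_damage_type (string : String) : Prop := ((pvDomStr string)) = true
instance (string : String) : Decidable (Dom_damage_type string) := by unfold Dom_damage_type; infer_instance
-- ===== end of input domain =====

-- B replaces A's sequential XOR bit-toggling loop by counting each relevant token and
-- combining the four parities arithmetically in one fixed step (objective: alternative).

-- ===== PORT A =====
def damage_type (string : String) : Int :=
  ((PySem.Str.split? (PySem.Str.replace string ";" "") " ").getD []).foldl
    (fun qty x =>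
      if x = "" then qty
      else if x = "B" then PySem.Int.bxor qty 1
      else if x = "P" then PySem.Int.bxor qty 2
      else if x = "S" then PySem.Int.bxor qty 4
      else if PySem.Str.lower x = "and" ∨ PySem.Str.lower x = "&" then PySem.Int.bxor qty 8
      else if PySem.Str.lower x = "or" then qty
      else qty) 0

-- ===== PORT B =====
def damage_type_alt (string : String) : Int :=
  let toks := (PySem.Str.split? (PySem.Str.replace string ";" "") " ").getD []
  let b := toks.count "B"
  let p := toks.count "P"
  let s := toks.count "S"
  let a := toks.countP (fun t => PySem.Str.lower t == "and" || PySem.Str.lower t == "&")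
  ((b % 2 : Nat) : Int) * 1 + ((p % 2 : Nat) : Int) * 2 + ((s % 2 : Nat) : Int) * 4 + ((a % 2 : Nat) : Int) * 8

-- ===== PRECONDITION & SPEC =====
def Spec_damage_type (string : String) (out : Int) : Prop := out = damage_type_alt string
instance (string : String) (out : Int) : Decidable (Spec_damage_type string out) := by unfold Spec_damage_type; infer_instance

-- ===== CLAIM (what is proved, stated in full; the proofs are below) =====
def Claim_equal_damage_type : Prop := ∀ (string : String), Dom_damage_type string → Spec_damage_type string (damage_type string)

-- ===== LEMMAS AND PROOFS =====

/-- B's combining step as a function of the four counts. -/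
def pvPatt (b p s a : Nat) : Int :=
  ((b % 2 : Nat) : Int) * 1 + ((p % 2 : Nat) : Int) * 2 + ((s % 2 : Nat) : Int) * 4 + ((a % 2 : Nat) : Int) * 8

/-- The and/& predicate used by B. -/
def pvIsAnd (t : String) : Bool := PySem.Str.lower t == "and" || PySem.Str.lower t == "&"

lemma pvPatt_xorB (b p s a : Nat) : PySem.Int.bxor (pvPatt b p s a) 1 = pvPatt (b + 1) p s a := by
  unfold pvPatt
  have h : (b + 1) % 2 = 1 - b % 2 := by omega
  rw [h]
  rcases Nat.mod_two_eq_zero_or_one b with hb | hb <;> rw [hb] <;>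
  rcases Nat.mod_two_eq_zero_or_one p with hp | hp <;> rw [hp] <;>
  rcases Nat.mod_two_eq_zero_or_one s with hs | hs <;> rw [hs] <;>
  rcases Nat.mod_two_eq_zero_or_one a with ha | ha <;> rw [ha] <;> decide

lemma pvPatt_xorP (b p s a : Nat) : PySem.Int.bxor (pvPatt b p s a) 2 = pvPatt b (p + 1) s a := by
  unfold pvPatt
  have h : (p + 1) % 2 = 1 - p % 2 := by omega
  rw [h]
  rcases Nat.mod_two_eq_zero_or_one b with hb | hb <;> rw [hb] <;>
  rcases Nat.mod_two_eq_zero_or_one p with hp | hp <;> rw [hp] <;>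
  rcases Nat.mod_two_eq_zero_or_one s with hs | hs <;> rw [hs] <;>
  rcases Nat.mod_two_eq_zero_or_one a with ha | ha <;> rw [ha] <;> decide

lemma pvPatt_xorS (b p s a : Nat) : PySem.Int.bxor (pvPatt b p s a) 4 = pvPatt b p (s + 1) a := by
  unfold pvPatt
  have h : (s + 1) % 2 = 1 - s % 2 := by omega
  rw [h]
  rcases Nat.mod_two_eq_zero_or_one b with hb | hb <;> rw [hb] <;>
  rcases Nat.mod_two_eq_zero_or_one p with hp | hp <;> rw [hp] <;>
  rcases Nat.mod_two_eq_zero_or_one s with hs | hs <;> rw [hs] <;>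
  rcases Nat.mod_two_eq_zero_or_one a with ha | ha <;> rw [ha] <;> decide

lemma pvPatt_xorA (b p s a : Nat) : PySem.Int.bxor (pvPatt b p s a) 8 = pvPatt b p s (a + 1) := by
  unfold pvPatt
  have h : (a + 1) % 2 = 1 - a % 2 := by omega
  rw [h]
  rcases Nat.mod_two_eq_zero_or_one b with hb | hb <;> rw [hb] <;>
  rcases Nat.mod_two_eq_zero_or_one p with hp | hp <;> rw [hp] <;>
  rcases Nat.mod_two_eq_zero_or_one s with hs | hs <;> rw [hs] <;>
  rcases Nat.mod_two_eq_zero_or_one a with ha | ha <;> rw [ha] <;> decide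

lemma pvLoop_eq (ts : List String) : ∀ (b p s a : Nat),
    ts.foldl
      (fun qty x =>
        if x = "" then qty
        else if x = "B" then PySem.Int.bxor qty 1
        else if x = "P" then PySem.Int.bxor qty 2
        else if x = "S" then PySem.Int.bxor qty 4
        else if PySem.Str.lower x = "and" ∨ PySem.Str.lower x = "&" then PySem.Int.bxor qty 8
        else if PySem.Str.lower x = "or" then qty
        else qty) (pvPatt b p s a)
    = pvPatt (b + ts.count "B") (p + ts.count "P") (s + ts.count "S") (a + ts.countP pvIsAnd) := by
  induction ts with
  | nil => intro b p s a; simp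
  | cons x ts ih =>
    intro b p s a
    simp only [List.foldl_cons, List.count_cons, List.countP_cons]
    by_cases h0 : x = ""
    · subst h0
      simp only [reduceIte]
      rw [ih b p s a]
      have : pvIsAnd "" = false := by decide
      simp [this]
    · rw [if_neg h0]
      by_cases hB : x = "B"
      · subst hB
        simp only [reduceIte]
        rw [pvPatt_xorB, ih (b + 1) p s a]
        have : pvIsAnd "B" = false := by decide
        simp [this]
        ring_nf
      · rw [if_neg hB]
        by_cases hP : x = "P"
        · subst hP
          simp only [reduceIte]
          rw [pvPatt_xorP, ih b (p + 1) s a]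
          have : pvIsAnd "P" = false := by decide
          simp [this]
          ring_nf
        · rw [if_neg hP]
          by_cases hS : x = "S"
          · subst hS
            simp only [reduceIte]
            rw [pvPatt_xorS, ih b p (s + 1) a]
            have : pvIsAnd "S" = false := by decide
            simp [this]
            ring_nf
          · rw [if_neg hS]
            have c1 : (x == "B") = false := by simp [hB]
            have c2 : (x == "P") = false := by simp [hP]
            have c3 : (x == "S") = false := by simp [hS]
            by_cases hA : PySem.Str.lower x = "and" ∨ PySem.Str.lower x = "&"
            · rw [if_pos hA]
              rw [pvPatt_xorA, ih b p s (a + 1)]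
              have hx : pvIsAnd x = true := by
                unfold pvIsAnd
                rcases hA with h | h <;> simp [h]
              simp [hx, c1, c2, c3]
              ring_nf
            · rw [if_neg hA]
              have hx : pvIsAnd x = false := by
                unfold pvIsAnd
                rw [not_or] at hA
                simp [hA.1, hA.2]
              by_cases hO : PySem.Str.lower x = "or"
              · rw [if_pos hO, ih b p s a]; simp [hx, c1, c2, c3]
              · rw [if_neg hO, ih b p s a]; simp [hx, c1, c2, c3]

-- ===== VERDICT (by name: the statement is the Claim_ definition above) =====
theorem damage_type_spec : Claim_equal_damage_type := by
  intro string _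
  unfold Spec_damage_type damage_type damage_type_alt
  have h0 : (0 : Int) = pvPatt 0 0 0 0 := by norm_num [pvPatt]
  rw [h0, pvLoop_eq ((PySem.Str.split? (PySem.Str.replace string ";" "") " ").getD []) 0 0 0 0]
  simp only [pvPatt, Nat.zero_add]
  rfl
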